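-- pv_equiv track=rewrite | github.com/GodMorduk/keeper_bot | handlers/mongo_handler.py | count_all_skills
-- ===== SOURCE A (Python) =====
-- def count_all_skills(entry):
--     all_skills = entry["skills"].values()
--     est_cost = 0
--     for skill in all_skills:
--         if skill == 1:
--             est_cost += 3
--         elif skill == 2:
--             est_cost += 7
--         elif skill == 3:
--             est_cost += 12
--     return est_cost
-- ===== SOURCE B (Python) =====
-- def count_all_skills(entry):
--     vals = list(entry["skills"].values())
--     return 3 * vals.count(1) + 7 * vals.count(2) + 12 * vals.count(3)
-- ===== Notes on version B (the rewrite author's own statement) =====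
-- stated objective: simpler
-- what changed: Replaces the per-element if/elif accumulation loop with counting each level once (list.count) and returning the fixed linear combination 3*c1 + 7*c2 + 12*c3.
import Mathlib
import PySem

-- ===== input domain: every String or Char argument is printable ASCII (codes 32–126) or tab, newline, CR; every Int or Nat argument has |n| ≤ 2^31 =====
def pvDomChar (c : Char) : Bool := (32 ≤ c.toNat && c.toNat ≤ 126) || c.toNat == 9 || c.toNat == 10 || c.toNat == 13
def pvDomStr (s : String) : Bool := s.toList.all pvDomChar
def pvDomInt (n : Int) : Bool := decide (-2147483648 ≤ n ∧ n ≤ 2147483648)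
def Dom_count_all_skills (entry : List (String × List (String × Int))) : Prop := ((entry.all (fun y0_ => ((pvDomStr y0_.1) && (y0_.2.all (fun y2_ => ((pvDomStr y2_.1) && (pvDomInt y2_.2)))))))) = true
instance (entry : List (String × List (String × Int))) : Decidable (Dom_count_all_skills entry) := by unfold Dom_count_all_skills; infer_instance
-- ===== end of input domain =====

-- B replaces the per-element if/elif accumulation with counting each level once and a fixed linear combination (simpler decomposition).

-- ===== PORT A =====
def count_all_skills (entry : List (String × List (String × Int))) : Int :=
  match (PySem.Dict.ofList entry).get? "skills" with
  | none => 0   -- KeyError: excluded by Pre_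
  | some skills =>
    ((PySem.Dict.ofList skills).values).foldl
      (fun est_cost skill =>
        if skill == 1 then est_cost + 3
        else if skill == 2 then est_cost + 7
        else if skill == 3 then est_cost + 12
        else est_cost) 0

-- ===== PORT B =====
def count_all_skills_alt (entry : List (String × List (String × Int))) : Int :=
  match (PySem.Dict.ofList entry).get? "skills" with
  | none => 0   -- KeyError: excluded by Pre_
  | some skills =>
    let vals := (PySem.Dict.ofList skills).values
    3 * PySem.List.count vals 1 + 7 * PySem.List.count vals 2 + 12 * PySem.List.count vals 3

-- ===== PRECONDITION & SPEC =====
-- Pre_: the entry dict has the key "skills" (otherwise A raises KeyError).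
def Pre_count_all_skills (entry : List (String × List (String × Int))) : Prop :=
  (PySem.Dict.ofList entry).contains "skills" = true
instance (entry : List (String × List (String × Int))) : Decidable (Pre_count_all_skills entry) := by unfold Pre_count_all_skills; infer_instance
def pvWitness_count_all_skills : (List (String × List (String × Int))) := [("skills", [("stealth", 1), ("magic", 3)])]

def Spec_count_all_skills (entry : List (String × List (String × Int))) (out : Int) : Prop := out = count_all_skills_alt entry
instance (entry : List (String × List (String × Int))) (out : Int) : Decidable (Spec_count_all_skills entry out) := by unfold Spec_count_all_skills; infer_instance

-- ===== CLAIM (what is proved, stated in full; the proofs are below) =====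
def Claim_equal_count_all_skills : Prop := ∀ (entry : List (String × List (String × Int))), Dom_count_all_skills entry → Pre_count_all_skills entry → Spec_count_all_skills entry (count_all_skills entry)

-- ===== LEMMAS AND PROOFS =====
theorem count_all_skills_fold_eq (vals : List Int) (acc : Int) :
    vals.foldl
      (fun est_cost skill =>
        if skill == 1 then est_cost + 3
        else if skill == 2 then est_cost + 7
        else if skill == 3 then est_cost + 12
        else est_cost) acc
    = acc + 3 * PySem.List.count vals 1 + 7 * PySem.List.count vals 2 + 12 * PySem.List.count vals 3 := by
  induction vals generalizing acc with
  | nil => simp [PySem.List.count]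
  | cons v vs ih =>
    simp only [List.foldl_cons, ih, PySem.List.count, List.count_cons]
    by_cases h1 : v = 1 <;> by_cases h2 : v = 2 <;> by_cases h3 : v = 3 <;>
      simp [h1, h2, h3] <;> ring

-- ===== VERDICT (by name: the statement is the Claim_ definition above) =====
theorem count_all_skills_spec : Claim_equal_count_all_skills := by
  intro entry _ _
  unfold Spec_count_all_skills count_all_skills count_all_skills_alt
  cases h : (PySem.Dict.ofList entry).get? "skills" with
  | none => rfl
  | some skills =>
    simp only [count_all_skills_fold_eq]
    ring
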